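-- pv_equiv track=rewrite | github.com/981377660LMT/algorithm-study | 11_动态规划/经典题/jump or not to jump/E - Work or Rest-固定连续长度.py | workOrRest
-- ===== SOURCE A (Python) =====
-- from functools import lru_cache
-- from typing import List
--
-- def workOrRest(n: int, scores: List[int]) -> int:
--     @lru_cache(None)
--     def dfs(index: int) -> int:
--         if index == n:
--             return 0
--         res = 0
--         for work in range(n + 1):  # 工作work天后休息1天
--             if index + work + 1 > n:
--                 break
--             res = max(res, preSum[work] + dfs(index + work + 1))
--         return res
--
--     preSum = [0] * (n + 1)  # 连续工作j天的得分
--     for i in range(1, n + 1):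
--         preSum[i] = preSum[i - 1] + scores[(i - 1) // 2]
--
--     res = dfs(0)
--     dfs.cache_clear()
--     return res
-- ===== SOURCE B (Python) =====
-- from typing import List
--
-- def workOrRest(n: int, scores: List[int]) -> int:
--     # Bottom-up DP table instead of memoized recursion.
--     if n <= 0:
--         return 0
--     preSum = [0] * (n + 1)  # score of working i consecutive days
--     for i in range(1, n + 1):
--         preSum[i] = preSum[i - 1] + scores[(i - 1) // 2]
--     dp = [0] * (n + 1)  # dp[index] = best score from day index on
--     for index in range(n - 1, -1, -1):
--         best = 0
--         for work in range(n - index):  # work days then 1 rest day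
--             best = max(best, preSum[work] + dp[index + work + 1])
--         dp[index] = best
--     return dp[0]
-- ===== Notes on version B (the rewrite author's own statement) =====
-- stated objective: alternative
-- what changed: Replaced the lru_cache top-down recursion (dfs with an inner break loop) by an explicit bottom-up DP table filled from index n-1 down to 0 over the same prefix sums; same O(n^2) work without recursion or a cache.
import Mathlib
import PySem

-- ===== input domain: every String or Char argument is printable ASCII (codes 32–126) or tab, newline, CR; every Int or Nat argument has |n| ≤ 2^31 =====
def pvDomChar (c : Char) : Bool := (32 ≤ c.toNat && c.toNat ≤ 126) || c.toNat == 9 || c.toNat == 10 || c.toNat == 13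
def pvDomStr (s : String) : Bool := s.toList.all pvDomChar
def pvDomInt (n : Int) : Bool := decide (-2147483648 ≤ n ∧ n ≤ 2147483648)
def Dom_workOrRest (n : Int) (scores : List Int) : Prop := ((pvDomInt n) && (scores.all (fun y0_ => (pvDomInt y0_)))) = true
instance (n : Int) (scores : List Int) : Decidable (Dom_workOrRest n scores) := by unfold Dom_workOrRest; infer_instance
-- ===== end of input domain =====

-- B replaces A's lru_cache top-down recursion by an explicit bottom-up DP table (same values, no recursion/cache).

-- ===== PORT A =====
-- preSum of A: preSum[0] = 0, preSum[i] = preSum[i-1] + scores[(i-1)//2];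
-- the index (i-1)//2 is ≥ 0, so scores[(i-1)//2] is pyGet?; the `.getD 0` arm is
-- unreachable under Pre_ (where Python would raise IndexError).
def preSumF (scores : List Int) : Nat → Int
  | 0 => 0
  | k + 1 => preSumF scores k + ((PySem.List.pyGet? scores (Int.ofNat (k / 2))).getD 0)

-- dfs of A: the `break` at index+work+1 > n truncates `for work in range(n+1)` to
-- exactly work ∈ range((n-index).toNat) (dfs is reached only with 0 ≤ index ≤ n).
def dfsA (scores : List Int) (n : Int) (index : Int) : Int :=
  if index = n then 0
  else
    (List.range (n - index).toNat).attach.foldl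
      (fun res w => max res (preSumF scores w.1 + dfsA scores n (index + (w.1 : Int) + 1))) 0
termination_by (n - index).toNat
decreasing_by
  have hw := List.mem_range.mp w.2
  omega

def workOrRest (n : Int) (scores : List Int) : Int :=
  dfsA scores n 0

-- ===== PORT B =====
-- preSum table of B, built left to right (preSum[i-1] is the running last element).
def preSumTab (scores : List Int) (m : Nat) : List Int :=
  (List.range m).foldl
    (fun acc i => acc ++ [acc.getLastD 0 + ((PySem.List.pyGet? scores (Int.ofNat (i / 2))).getD 0)]) [0]

-- inner loop of B: best over work in range(n - index); the dp list holds
-- [dp[index+1], …, dp[n]], so dp[index+work+1] is dp.getD work and n-index is dp.length.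
def bestNext (preSum dp : List Int) : Int :=
  (List.range dp.length).foldl (fun best work => max best (preSum.getD work 0 + dp.getD work 0)) 0

def workOrRest_alt (n : Int) (scores : List Int) : Int :=
  if n ≤ 0 then 0
  else
    let m := n.toNat
    let ps := preSumTab scores m
    -- for index in range(n-1, -1, -1): dp[index] = best  (prepend, n - index = dp.length)
    let dp := (List.range m).foldl (fun dp _ => bestNext ps dp :: dp) [0]
    dp.headD 0

-- ===== PRECONDITION & SPEC =====
-- Pre_ excludes exactly the inputs where Python A raises IndexError while building
-- preSum (scores[(i-1)//2] out of range, i.e. n > 2*len(scores)); B raises there too.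
def Pre_workOrRest (n : Int) (scores : List Int) : Prop := n ≤ 2 * (scores.length : Int)
instance (n : Int) (scores : List Int) : Decidable (Pre_workOrRest n scores) := by
  unfold Pre_workOrRest; infer_instance

def pvWitness_workOrRest : Int × List Int := (4, [3, -1])

def Spec_workOrRest (n : Int) (scores : List Int) (out : Int) : Prop := out = workOrRest_alt n scores
instance (n : Int) (scores : List Int) (out : Int) : Decidable (Spec_workOrRest n scores out) := by unfold Spec_workOrRest; infer_instance

-- ===== CLAIM (what is proved, stated in full; the proofs are below) =====
def Claim_equal_workOrRest : Prop := ∀ (n : Int) (scores : List Int), Dom_workOrRest n scores → Pre_workOrRest n scores → Spec_workOrRest n scores (workOrRest n scores)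

-- ===== LEMMAS AND PROOFS =====

-- dfsA with the attach stripped off.
theorem dfsA_eq (scores : List Int) (n index : Int) :
    dfsA scores n index =
      if index = n then 0
      else
        (List.range (n - index).toNat).foldl
          (fun res w => max res (preSumF scores w + dfsA scores n (index + (w : Int) + 1))) 0 := by
  rw [dfsA]
  split
  · rfl
  · exact List.foldl_attach
      (f := fun res w => max res (preSumF scores w + dfsA scores n (index + (w : Int) + 1)))

theorem preSumTab_eq (scores : List Int) (m : Nat) :
    preSumTab scores m = (List.range (m + 1)).map (preSumF scores) := by
  induction m with
  | zero => simp [preSumTab, preSumF]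
  | succ m ih =>
    unfold preSumTab at *
    rw [List.range_succ, List.foldl_append, ih]
    rw [List.range_succ (n := m + 1), List.map_append]
    simp only [List.foldl_cons, List.foldl_nil, List.map_cons, List.map_nil]
    congr 1
    rw [List.range_succ, List.map_append]
    simp [preSumF]

theorem getD_map_range {f : Nat → Int} {m w : Nat} (h : w < m) :
    ((List.range m).map f).getD w 0 = f w := by
  rw [List.getD_eq_getElem?_getD]
  simp [h]

-- the dp invariant: after k steps the dp list is [dfs(n-k), dfs(n-k+1), …, dfs(n)]
theorem dpInv (scores : List Int) (m : Nat) (k : Nat) (hk : k ≤ m) :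
    (List.range k).foldl (fun dp _ => bestNext (preSumTab scores m) dp :: dp) [0] =
      (List.range (k + 1)).map (fun j => dfsA scores (m : Int) ((m - k + j : Nat) : Int)) := by
  induction k with
  | zero =>
    simp only [List.range_zero, List.foldl_nil, zero_add, List.range_one, List.map_cons,
      List.map_nil, Nat.sub_zero, Nat.add_zero]
    rw [dfsA_eq]
    simp
  | succ k ih =>
    have hk' : k ≤ m := by omega
    rw [List.range_succ, List.foldl_append, ih hk']
    simp only [List.foldl_cons, List.foldl_nil]
    rw [List.range_succ_eq_map (n := k + 1), List.map_cons, List.map_map]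
    congr 1
    · -- the new head equals dfs at index m-(k+1)
      rw [dfsA_eq]
      simp only [Nat.add_zero]
      have hne : ((m - (k + 1) : Nat) : Int) ≠ (m : Int) := by omega
      rw [if_neg hne]
      have hlen : ((List.range (k + 1)).map
          (fun j => dfsA scores (m : Int) ((m - k + j : Nat) : Int))).length = k + 1 := by
        simp
      have hrange : ((m : Int) - ((m - (k + 1) : Nat) : Int)).toNat = k + 1 := by omega
      rw [bestNext, hlen, hrange]
      refine PySem.List.foldl_congr_mem _ _ _ _ (fun best w hw => ?_)
      have hwlt : w < k + 1 := List.mem_range.mp hw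
      rw [preSumTab_eq]
      rw [getD_map_range (by omega), getD_map_range hwlt]
      have : ((m - (k + 1) : Nat) : Int) + (w : Int) + 1 = ((m - k + w : Nat) : Int) := by omega
      rw [this]
    · -- the old list, re-indexed
      apply List.map_congr_left
      intro j hj
      simp only [Function.comp]
      congr 1
      omega

-- ===== VERDICT (by name: the statement is the Claim_ definition above) =====
theorem workOrRest_spec : Claim_equal_workOrRest := by
  intro n scores _ _
  unfold Spec_workOrRest workOrRest workOrRest_alt
  by_cases hn : n ≤ 0
  · rw [if_pos hn, dfsA_eq]
    by_cases h0 : (0 : Int) = n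
    · rw [if_pos h0]
    · rw [if_neg h0]
      have : (n - 0).toNat = 0 := by omega
      rw [this]
      rfl
  · rw [if_neg hn]
    have hm : n = (n.toNat : Int) := by omega
    rw [hm]
    simp only [Int.toNat_natCast]
    rw [dpInv scores n.toNat n.toNat le_rfl]
    rw [List.range_succ_eq_map, List.map_cons]
    simp
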